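-- pv_equiv track=rewrite | github.com/tkucner/rose | strucutre_extraction.py | central_line_approximation
-- ===== SOURCE A (Python) =====
-- def central_line_approximation(cells):
--     x = [c[0] for c in cells]
--     y = [c[1] for c in cells]
--     if max(x) - min(x) > max(y) - min(y):
--         beginning = (x[x.index(min(x))], y[x.index(min(x))])
--         end = (x[x.index(max(x))], y[x.index(max(x))])
--     else:
--         beginning = (x[y.index(min(y))], y[y.index(min(y))])
--         end = (x[y.index(max(y))], y[y.index(max(y))])
--
--     return beginning, end
-- ===== SOURCE B (Python) =====
-- def central_line_approximation(cells):
--     if not cells: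
--         raise ValueError("min() arg is an empty sequence")
--     pminx = pmaxx = pminy = pmaxy = cells[0]
--     for c in cells[1:]:
--         if c[0] < pminx[0]:
--             pminx = c
--         if c[0] > pmaxx[0]:
--             pmaxx = c
--         if c[1] < pminy[1]:
--             pminy = c
--         if c[1] > pmaxy[1]:
--             pmaxy = c
--     if pmaxx[0] - pminx[0] > pmaxy[1] - pminy[1]:
--         return (pminx[0], pminx[1]), (pmaxx[0], pmaxx[1])
--     return (pminy[0], pminy[1]), (pmaxy[0], pmaxy[1])
-- ===== Notes on version B (the rewrite author's own statement) =====
-- stated objective: faster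
-- what changed: Replaces A's eight separate list traversals (two comprehensions, four min/max calls, repeated list.index scans plus indexing) by a single loop that maintains the first cell attaining each of min-x, max-x, min-y, max-y, using strict comparisons so the first occurrence wins exactly as list.index does.
import Mathlib
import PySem

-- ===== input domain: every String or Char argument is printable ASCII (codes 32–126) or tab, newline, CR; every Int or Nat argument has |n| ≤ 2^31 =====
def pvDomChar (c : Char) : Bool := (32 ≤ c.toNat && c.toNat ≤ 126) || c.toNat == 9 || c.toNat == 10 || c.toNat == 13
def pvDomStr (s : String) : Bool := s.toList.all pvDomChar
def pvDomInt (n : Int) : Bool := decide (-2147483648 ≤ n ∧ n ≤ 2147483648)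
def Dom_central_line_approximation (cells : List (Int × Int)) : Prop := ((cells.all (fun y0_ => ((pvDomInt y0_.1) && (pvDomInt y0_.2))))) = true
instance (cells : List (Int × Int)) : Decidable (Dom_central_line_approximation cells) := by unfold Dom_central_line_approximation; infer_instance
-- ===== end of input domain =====

-- B replaces A's eight list traversals (comprehensions, min/max, list.index) by one
-- loop tracking the first cell attaining each extremum (a constant-factor mechanism; same O(n)).

-- ===== PORT A =====
def central_line_approximation (cells : List (Int × Int)) : (Int × Int) × (Int × Int) :=
  let x := cells.map (fun c => c.1)
  let y := cells.map (fun c => c.2)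
  let mxx : Int := (PySem.List.max? x (fun v => v)).getD 0
  let mnx : Int := (PySem.List.min? x (fun v => v)).getD 0
  let mxy : Int := (PySem.List.max? y (fun v => v)).getD 0
  let mny : Int := (PySem.List.min? y (fun v => v)).getD 0
  if mxx - mnx > mxy - mny then
    let ib := (PySem.List.index? x mnx).getD 0
    let ie := (PySem.List.index? x mxx).getD 0
    ((PySem.List.pyGetD x (ib : Int) 0, PySem.List.pyGetD y (ib : Int) 0),
     (PySem.List.pyGetD x (ie : Int) 0, PySem.List.pyGetD y (ie : Int) 0))
  else
    let ib := (PySem.List.index? y mny).getD 0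
    let ie := (PySem.List.index? y mxy).getD 0
    ((PySem.List.pyGetD x (ib : Int) 0, PySem.List.pyGetD y (ib : Int) 0),
     (PySem.List.pyGetD x (ie : Int) 0, PySem.List.pyGetD y (ie : Int) 0))

-- ===== PORT B =====
def clx_step (s : (Int × Int) × (Int × Int) × (Int × Int) × (Int × Int)) (c : Int × Int) :
    (Int × Int) × (Int × Int) × (Int × Int) × (Int × Int) :=
  let pminx := if c.1 < s.1.1 then c else s.1
  let pmaxx := if c.1 > s.2.1.1 then c else s.2.1
  let pminy := if c.2 < s.2.2.1.2 then c else s.2.2.1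
  let pmaxy := if c.2 > s.2.2.2.2 then c else s.2.2.2
  (pminx, pmaxx, pminy, pmaxy)

def central_line_approximation_alt (cells : List (Int × Int)) : (Int × Int) × (Int × Int) :=
  match cells with
  | [] => ((0, 0), (0, 0))   -- unreachable under Pre_ (Python B raises ValueError here, as A does)
  | c0 :: rest =>
    let st := rest.foldl clx_step (c0, c0, c0, c0)
    let pminx := st.1
    let pmaxx := st.2.1
    let pminy := st.2.2.1
    let pmaxy := st.2.2.2
    if pmaxx.1 - pminx.1 > pmaxy.2 - pminy.2 then
      ((pminx.1, pminx.2), (pmaxx.1, pmaxx.2))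
    else
      ((pminy.1, pminy.2), (pmaxy.1, pmaxy.2))

-- ===== PRECONDITION & SPEC =====
-- Pre_ excludes only the empty list, on which Python A raises ValueError (max() of an empty sequence).
def Pre_central_line_approximation (cells : List (Int × Int)) : Prop := cells ≠ []
instance (cells : List (Int × Int)) : Decidable (Pre_central_line_approximation cells) := by
  unfold Pre_central_line_approximation; infer_instance

def pvWitness_central_line_approximation : (List (Int × Int)) := [(0, 1), (3, 2)]

def Spec_central_line_approximation (cells : List (Int × Int)) (out : (Int × Int) × (Int × Int)) : Prop := out = central_line_approximation_alt cells
instance (cells : List (Int × Int)) (out : (Int × Int) × (Int × Int)) : Decidable (Spec_central_line_approximation cells out) := by unfold Spec_central_line_approximation; infer_instance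

-- ===== CLAIM (what is proved, stated in full; the proofs are below) =====
def Claim_equal_central_line_approximation : Prop := ∀ (cells : List (Int × Int)), Dom_central_line_approximation cells → Pre_central_line_approximation cells → Spec_central_line_approximation cells (central_line_approximation cells)

-- ===== LEMMAS AND PROOFS =====

-- the loop-bodies of B's single pass, seen as four independent folds
def argMinBy (k : (Int × Int) → Int) (c0 : Int × Int) (xs : List (Int × Int)) : Int × Int :=
  xs.foldl (fun p c => if k c < k p then c else p) c0
def argMaxBy (k : (Int × Int) → Int) (c0 : Int × Int) (xs : List (Int × Int)) : Int × Int :=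
  xs.foldl (fun p c => if k c > k p then c else p) c0

lemma foldl_quad (rest : List (Int × Int)) (a b c d : Int × Int) :
    rest.foldl clx_step (a, b, c, d) =
      (argMinBy Prod.fst a rest, argMaxBy Prod.fst b rest,
       argMinBy Prod.snd c rest, argMaxBy Prod.snd d rest) := by
  induction rest generalizing a b c d with
  | nil => rfl
  | cons e t ih => simp [List.foldl_cons, clx_step, argMinBy, argMaxBy, ih]

lemma foldl_min_le (l : List Int) (a : Int) : l.foldl min a ≤ a := by
  induction l generalizing a with
  | nil => exact le_refl a
  | cons b t ih => exact le_trans (ih (min a b)) (min_le_left a b)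

lemma le_foldl_max (l : List Int) (a : Int) : a ≤ l.foldl max a := by
  induction l generalizing a with
  | nil => exact le_refl a
  | cons b t ih => exact le_trans (le_max_left a b) (ih (max a b))

lemma key_argMinBy (k : (Int × Int) → Int) (xs : List (Int × Int)) (c0 : Int × Int) :
    k (argMinBy k c0 xs) = (xs.map k).foldl min (k c0) := by
  induction xs generalizing c0 with
  | nil => rfl
  | cons c t ih =>
    simp only [argMinBy, List.foldl_cons, List.map_cons] at *
    by_cases h : k c < k c0
    · simp [h, ih, min_eq_right (le_of_lt h)]
    · simp [h, ih, min_eq_left (le_of_not_gt h)]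

lemma key_argMaxBy (k : (Int × Int) → Int) (xs : List (Int × Int)) (c0 : Int × Int) :
    k (argMaxBy k c0 xs) = (xs.map k).foldl max (k c0) := by
  induction xs generalizing c0 with
  | nil => rfl
  | cons c t ih =>
    simp only [argMaxBy, List.foldl_cons, List.map_cons] at *
    by_cases h : k c > k c0
    · simp [h, ih, max_eq_right (le_of_lt h)]
    · simp [h, ih, max_eq_left (le_of_not_gt h)]

lemma find_argMinBy (k : (Int × Int) → Int) (xs : List (Int × Int)) (c0 : Int × Int) :
    List.find? (fun c => k c == (xs.map k).foldl min (k c0)) (c0 :: xs) = some (argMinBy k c0 xs) := by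
  induction xs generalizing c0 with
  | nil => simp [argMinBy]
  | cons c t ih =>
    have hle : (t.map k).foldl min (min (k c0) (k c)) ≤ min (k c0) (k c) := foldl_min_le _ _
    simp only [List.map_cons, List.foldl_cons]
    by_cases h : k c < k c0
    · have hseed : min (k c0) (k c) = k c := min_eq_right (le_of_lt h)
      have h0 : (k c0 == (t.map k).foldl min (min (k c0) (k c))) = false := by
        simp only [beq_eq_false_iff_ne, ne_eq]
        intro he
        rw [hseed] at hle he
        omega
      rw [hseed] at h0 ⊢
      rw [List.find?_cons_of_neg (a := c0) (l := c :: t) (by simp [h0])]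
      have harg : argMinBy k c0 (c :: t) = argMinBy k c t := by
        simp [argMinBy, h]
      rw [harg]
      exact ih c
    · have hseed : min (k c0) (k c) = k c0 := min_eq_left (le_of_not_gt h)
      rw [hseed]
      have hfind := ih c0
      by_cases h0 : (k c0 == (t.map k).foldl min (k c0)) = true
      · rw [List.find?_cons_of_pos (a := c0) (l := c :: t) h0]
        rw [List.find?_cons_of_pos (a := c0) (l := t) h0] at hfind
        injection hfind with hfind
        have harg : argMinBy k c0 (c :: t) = argMinBy k c0 t := by
          simp [argMinBy, h]
        rw [harg, ← hfind]
      · have h0' : (k c0 == (t.map k).foldl min (k c0)) = false := by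
          simpa using h0
        have hc : (k c == (t.map k).foldl min (k c0)) = false := by
          simp only [beq_eq_false_iff_ne, ne_eq] at h0' ⊢
          intro he
          have h1 : (t.map k).foldl min (k c0) ≤ k c0 := foldl_min_le _ _
          omega
        rw [List.find?_cons_of_neg (a := c0) (l := c :: t) (by simp [h0'])]
        rw [List.find?_cons_of_neg (a := c) (l := t) (by simp [hc])]
        rw [List.find?_cons_of_neg (a := c0) (l := t) (by simp [h0'])] at hfind
        have harg : argMinBy k c0 (c :: t) = argMinBy k c0 t := by
          simp [argMinBy, h]
        rw [harg]
        exact hfind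

lemma find_argMaxBy (k : (Int × Int) → Int) (xs : List (Int × Int)) (c0 : Int × Int) :
    List.find? (fun c => k c == (xs.map k).foldl max (k c0)) (c0 :: xs) = some (argMaxBy k c0 xs) := by
  induction xs generalizing c0 with
  | nil => simp [argMaxBy]
  | cons c t ih =>
    have hle : max (k c0) (k c) ≤ (t.map k).foldl max (max (k c0) (k c)) := le_foldl_max _ _
    simp only [List.map_cons, List.foldl_cons]
    by_cases h : k c > k c0
    · have hseed : max (k c0) (k c) = k c := max_eq_right (le_of_lt h)
      have h0 : (k c0 == (t.map k).foldl max (max (k c0) (k c))) = false := by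
        simp only [beq_eq_false_iff_ne, ne_eq]
        intro he
        rw [hseed] at hle he
        omega
      rw [hseed] at h0 ⊢
      rw [List.find?_cons_of_neg (a := c0) (l := c :: t) (by simp [h0])]
      have harg : argMaxBy k c0 (c :: t) = argMaxBy k c t := by
        simp [argMaxBy, h]
      rw [harg]
      exact ih c
    · have hseed : max (k c0) (k c) = k c0 := max_eq_left (le_of_not_gt h)
      rw [hseed]
      have hfind := ih c0
      by_cases h0 : (k c0 == (t.map k).foldl max (k c0)) = true
      · rw [List.find?_cons_of_pos (a := c0) (l := c :: t) h0]
        rw [List.find?_cons_of_pos (a := c0) (l := t) h0] at hfind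
        injection hfind with hfind
        have harg : argMaxBy k c0 (c :: t) = argMaxBy k c0 t := by
          simp [argMaxBy, h]
        rw [harg, ← hfind]
      · have h0' : (k c0 == (t.map k).foldl max (k c0)) = false := by
          simpa using h0
        have hc : (k c == (t.map k).foldl max (k c0)) = false := by
          simp only [beq_eq_false_iff_ne, ne_eq] at h0' ⊢
          intro he
          have h1 : k c0 ≤ (t.map k).foldl max (k c0) := le_foldl_max _ _
          omega
        rw [List.find?_cons_of_neg (a := c0) (l := c :: t) (by simp [h0'])]
        rw [List.find?_cons_of_neg (a := c) (l := t) (by simp [hc])]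
        rw [List.find?_cons_of_neg (a := c0) (l := t) (by simp [h0'])] at hfind
        have harg : argMaxBy k c0 (c :: t) = argMaxBy k c0 t := by
          simp [argMaxBy, h]
        rw [harg]
        exact hfind

lemma getPair_of_find {β : Type} (f : (Int × Int) → β) (d : β) (k : (Int × Int) → Int)
    (cells : List (Int × Int)) (m : Int) (p : Int × Int)
    (h : List.find? (fun c => k c == m) cells = some p) :
    PySem.List.pyGetD (cells.map f) (((List.idxOf? m (cells.map k)).getD 0 : Nat) : Int) d = f p := by
  induction cells with
  | nil => simp at h
  | cons c t ih =>
    by_cases hc : (k c == m) = true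
    · rw [List.find?_cons_of_pos (a := c) (l := t) hc] at h
      injection h with h; subst h
      simp [List.idxOf?_cons, hc]
    · have hc' : (k c == m) = false := by simpa using hc
      rw [List.find?_cons_of_neg (a := c) (l := t) (by simp [hc'])] at h
      have hmem : m ∈ t.map k := by
        have hp := List.find?_some h
        have hpm : k p = m := by simpa using hp
        exact hpm ▸ List.mem_map_of_mem (List.mem_of_find?_eq_some h)
      obtain ⟨i, hi⟩ : ∃ i, List.idxOf? m (t.map k) = some i := by
        cases hidx : List.idxOf? m (t.map k) with
        | none => exact absurd (List.idxOf?_eq_none_iff.mp hidx) (by simpa using hmem)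
        | some i => exact ⟨i, rfl⟩
      have := ih h
      rw [hi] at this
      simp only [List.map_cons, List.idxOf?_cons, hc', Bool.false_eq_true, if_false,
        Option.map_some, hi, Option.getD_some]
      simp only [PySem.List.pyGetD_natCast] at *
      simpa [List.getD_cons_succ] using this

-- ===== VERDICT (by name: the statement is the Claim_ definition above) =====
theorem central_line_approximation_spec : Claim_equal_central_line_approximation := by
  intro cells _ hpre
  unfold Spec_central_line_approximation
  cases cells with
  | nil => exact absurd rfl hpre
  | cons c0 rest =>
    simp only [central_line_approximation, central_line_approximation_alt, List.map_cons,
      PySem.List.min?_id_cons, PySem.List.max?_id_cons, Option.getD_some,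
      PySem.List.index?_eq_idxOf?, foldl_quad]
    simp only [show (fun c : Int × Int => c.1) = Prod.fst from rfl,
      show (fun c : Int × Int => c.2) = Prod.snd from rfl]
    have e1 := key_argMinBy Prod.fst rest c0
    have e2 := key_argMaxBy Prod.fst rest c0
    have e3 := key_argMinBy Prod.snd rest c0
    have e4 := key_argMaxBy Prod.snd rest c0
    rw [← e1, ← e2, ← e3, ← e4]
    have hfmin1 := find_argMinBy Prod.fst rest c0
    have hfmax1 := find_argMaxBy Prod.fst rest c0
    have hfmin2 := find_argMinBy Prod.snd rest c0
    have hfmax2 := find_argMaxBy Prod.snd rest c0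
    rw [← e1] at hfmin1
    rw [← e2] at hfmax1
    rw [← e3] at hfmin2
    rw [← e4] at hfmax2
    have g11 := getPair_of_find Prod.fst 0 Prod.fst (c0 :: rest) _ _ hfmin1
    have g12 := getPair_of_find Prod.snd 0 Prod.fst (c0 :: rest) _ _ hfmin1
    have g21 := getPair_of_find Prod.fst 0 Prod.fst (c0 :: rest) _ _ hfmax1
    have g22 := getPair_of_find Prod.snd 0 Prod.fst (c0 :: rest) _ _ hfmax1
    have g31 := getPair_of_find Prod.fst 0 Prod.snd (c0 :: rest) _ _ hfmin2
    have g32 := getPair_of_find Prod.snd 0 Prod.snd (c0 :: rest) _ _ hfmin2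
    have g41 := getPair_of_find Prod.fst 0 Prod.snd (c0 :: rest) _ _ hfmax2
    have g42 := getPair_of_find Prod.snd 0 Prod.snd (c0 :: rest) _ _ hfmax2
    simp only [List.map_cons] at g11 g12 g21 g22 g31 g32 g41 g42
    by_cases hc : (argMaxBy Prod.fst c0 rest).1 - (argMinBy Prod.fst c0 rest).1 >
        (argMaxBy Prod.snd c0 rest).2 - (argMinBy Prod.snd c0 rest).2
    · rw [if_pos hc, if_pos hc, g11, g12, g21, g22]
    · rw [if_neg hc, if_neg hc, g31, g32, g41, g42]
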